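-- pv_equiv track=rewrite | github.com/vasileiosTs0/JaneStreetPuzzles | October2024.py | find_knight_paths
-- ===== SOURCE A (Python) =====
-- def is_valid_move(pos):
--     return 0 <= pos[0] < 6 and 0 <= pos[1] < 6
--
-- def find_knight_paths(start, end, max_depth=10):
--     paths = []
--
--     def dfs(current_pos, path, visited):
--         if current_pos == end:
--             paths.append(path[:])  # Save the path when the end position is reached
--             return
--         if len(path) > max_depth:
--             return  # Stop if we exceed the max allowed moves
--         for move in knight_moves:
--             next_pos = (current_pos[0] + move[0], current_pos[1] + move[1])
--             if is_valid_move(next_pos) and next_pos not in visited: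
--                 visited.add(next_pos)
--                 path.append(next_pos)
--                 dfs(next_pos, path, visited)
--                 # Backtrack
--                 visited.remove(next_pos)
--                 path.pop()
--
--     dfs(start, [start], set([start]))  # Start DFS from the start position
--     return paths
--
-- knight_moves = [(2, 1), (2, -1), (-2, 1), (-2, -1), (1, 2), (1, -2), (-1, 2), (-1, -2)]
-- ===== SOURCE B (Python) =====
-- knight_moves = [(2, 1), (2, -1), (-2, 1), (-2, -1), (1, 2), (1, -2), (-1, 2), (-1, -2)]
--
-- def is_valid_move(pos):
--     return 0 <= pos[0] < 6 and 0 <= pos[1] < 6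
--
-- def find_knight_paths(start, end, max_depth=10):
--     paths = []
--     stack = [(start, [start], {start})]
--     while stack:
--         pos, path, visited = stack.pop()
--         if pos == end:
--             paths.append(path)
--             continue
--         if len(path) > max_depth:
--             continue
--         for move in reversed(knight_moves):
--             nxt = (pos[0] + move[0], pos[1] + move[1])
--             if is_valid_move(nxt) and nxt not in visited:
--                 stack.append((nxt, path + [nxt], visited | {nxt}))
--     return paths
-- ===== Notes on version B (the rewrite author's own statement) =====
-- stated objective: alternative
-- what changed: Replaces the recursive backtracking DFS (shared mutable path/visited with undo) by an explicit stack-based iteration whose frames carry independent path/visited copies, pushing neighbors in reverse move order to preserve the exact output order.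
import Mathlib
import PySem

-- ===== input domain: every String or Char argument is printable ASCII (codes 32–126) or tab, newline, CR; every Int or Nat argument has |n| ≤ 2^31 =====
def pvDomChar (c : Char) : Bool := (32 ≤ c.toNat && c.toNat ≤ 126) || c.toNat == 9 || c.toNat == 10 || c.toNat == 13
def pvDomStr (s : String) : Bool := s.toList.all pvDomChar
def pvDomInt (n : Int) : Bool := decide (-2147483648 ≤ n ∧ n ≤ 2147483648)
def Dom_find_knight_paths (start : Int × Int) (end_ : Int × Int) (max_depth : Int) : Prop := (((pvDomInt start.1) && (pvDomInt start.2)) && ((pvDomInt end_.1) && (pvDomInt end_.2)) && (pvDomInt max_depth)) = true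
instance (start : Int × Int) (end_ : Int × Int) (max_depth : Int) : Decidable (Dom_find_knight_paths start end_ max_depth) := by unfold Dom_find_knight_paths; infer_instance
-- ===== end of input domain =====

-- ===== PORT A =====
-- B replaces A's recursive backtracking DFS by an explicit stack of independent frames (same output, alternative decomposition).
def kmKnightMoves : List (Int × Int) :=
  [(2, 1), (2, -1), (-2, 1), (-2, -1), (1, 2), (1, -2), (-1, 2), (-1, -2)]

def kmIsValidMove (pos : Int × Int) : Bool :=
  decide (0 ≤ pos.1 ∧ pos.1 < 6 ∧ 0 ≤ pos.2 ∧ pos.2 < 6)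

-- literal transliteration of A's nested `dfs`; Python mutates visited/path and backtracks,
-- which is the same as passing the extended copies down; `fuel` is a totality guard only
-- (the recursion adds a fresh board cell to `visited` each level, so 37 levels suffice).
def kmDfs (end_ : Int × Int) (max_depth : Int) (fuel : Nat) (current_pos : Int × Int)
    (path : List (Int × Int)) (visited : PySem.Set (Int × Int)) : List (List (Int × Int)) :=
    if current_pos = end_ then [path]
    else if (path.length : Int) > max_depth then []
    else
      match fuel with
      | 0 => []
      | f + 1 =>
        kmKnightMoves.foldl (fun acc move =>
          let next_pos : Int × Int := (current_pos.1 + move.1, current_pos.2 + move.2)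
          if kmIsValidMove next_pos ∧ ¬ PySem.Set.contains visited next_pos then
            acc ++ kmDfs end_ max_depth f next_pos (path ++ [next_pos])
                    (PySem.Set.add visited next_pos)
          else acc) []

def find_knight_paths (start : Int × Int) (end_ : Int × Int) (max_depth : Int) : List (List (Int × Int)) :=
  kmDfs end_ max_depth 37 start [start] (PySem.Set.ofList [start])

-- ===== PORT B =====
-- a frame of B's stack: (current position, path copy, visited copy, fuel guard)
abbrev KmFrame := (Int × Int) × List (Int × Int) × PySem.Set (Int × Int) × Nat

-- the frames B pushes for one popped frame; Python pushes them in reversed move order onto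
-- the tail-popped stack, which equals prepending them in forward order to a head-popped stack.
def kmChildren (moves : List (Int × Int)) (c : Int × Int) (p : List (Int × Int))
    (v : PySem.Set (Int × Int)) (f : Nat) : List KmFrame :=
  moves.foldr (fun move cs =>
    let nxt : Int × Int := (c.1 + move.1, c.2 + move.2)
    if kmIsValidMove nxt ∧ ¬ PySem.Set.contains v nxt then (nxt, p ++ [nxt], PySem.Set.add v nxt, f) :: cs
    else cs) []

def km9pow : Nat → Nat
  | 0 => 1
  | n + 1 => 9 * km9pow n

lemma km9pow_pos (n : Nat) : 0 < km9pow n := by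
  induction n with
  | zero => simp [km9pow]
  | succ n ih => simp [km9pow]; omega

def kmFrameMeasure (fr : KmFrame) : Nat := km9pow fr.2.2.2

lemma kmChildren_measure_le (moves : List (Int × Int)) (c : Int × Int) (p : List (Int × Int))
    (v : PySem.Set (Int × Int)) (f : Nat) :
    ((kmChildren moves c p v f).map kmFrameMeasure).sum ≤ moves.length * km9pow f := by
  induction moves with
  | nil => simp [kmChildren]
  | cons m ms ih =>
    simp only [kmChildren, List.foldr_cons, List.length_cons] at *
    rw [Nat.add_mul, Nat.one_mul]
    split
    · simp only [List.map_cons, List.sum_cons, kmFrameMeasure]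
      omega
    · omega

-- B's while-loop over the explicit stack (head of the list = top of the stack)
def kmLoop (end_ : Int × Int) (max_depth : Int) :
    List KmFrame → List (List (Int × Int)) → List (List (Int × Int))
  | [], paths => paths
  | (c, p, v, f) :: rest, paths =>
    if c = end_ then kmLoop end_ max_depth rest (paths ++ [p])
    else if (p.length : Int) > max_depth then kmLoop end_ max_depth rest paths
    else
      if f = 0 then kmLoop end_ max_depth rest paths
      else
        kmLoop end_ max_depth
          (kmChildren kmKnightMoves c p v (f - 1) ++ rest) paths
  termination_by frames => (frames.map kmFrameMeasure).sum
  decreasing_by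
  all_goals simp only [List.map_cons, List.sum_cons, List.map_append, List.sum_append,
    kmFrameMeasure]
  all_goals try (have := km9pow_pos f; omega)
  · have h := kmChildren_measure_le kmKnightMoves c p v (f - 1)
    have h9 : km9pow f = 9 * km9pow (f - 1) := by
      cases f with
      | zero => omega
      | succ n => simp [km9pow]
    have hp := km9pow_pos (f - 1)
    rw [show kmKnightMoves.length = 8 from rfl] at h
    omega

def find_knight_paths_alt (start : Int × Int) (end_ : Int × Int) (max_depth : Int) : List (List (Int × Int)) :=
  kmLoop end_ max_depth [(start, [start], PySem.Set.ofList [start], 37)] []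

-- ===== PRECONDITION & SPEC =====
def Spec_find_knight_paths (start : Int × Int) (end_ : Int × Int) (max_depth : Int) (out : List (List (Int × Int))) : Prop := out = find_knight_paths_alt start end_ max_depth
instance (start : Int × Int) (end_ : Int × Int) (max_depth : Int) (out : List (List (Int × Int))) : Decidable (Spec_find_knight_paths start end_ max_depth out) := by unfold Spec_find_knight_paths; infer_instance

-- ===== CLAIM (what is proved, stated in full; the proofs are below) =====
def Claim_equal_find_knight_paths : Prop := ∀ (start : Int × Int) (end_ : Int × Int) (max_depth : Int), Dom_find_knight_paths start end_ max_depth → Spec_find_knight_paths start end_ max_depth (find_knight_paths start end_ max_depth)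

-- ===== LEMMAS AND PROOFS =====

-- the paths A's dfs collects from the state a frame of B stores
def kmDfsFrame (end_ : Int × Int) (max_depth : Int) (fr : KmFrame) : List (List (Int × Int)) :=
  kmDfs end_ max_depth fr.2.2.2 fr.1 fr.2.1 fr.2.2.1

-- unfolding equations of A's dfs, one per branch
lemma kmDfs_end (end_ : Int × Int) (md : Int) (f : Nat) (p : List (Int × Int))
    (v : PySem.Set (Int × Int)) : kmDfs end_ md f end_ p v = [p] := by
  rw [kmDfs.eq_def, if_pos rfl]

lemma kmDfs_deep (end_ : Int × Int) (md : Int) (f : Nat) (c : Int × Int) (p : List (Int × Int))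
    (v : PySem.Set (Int × Int)) (hend : ¬ c = end_) (hdep : (p.length : Int) > md) :
    kmDfs end_ md f c p v = [] := by
  rw [kmDfs.eq_def, if_neg hend, if_pos hdep]

lemma kmDfs_zero (end_ : Int × Int) (md : Int) (c : Int × Int) (p : List (Int × Int))
    (v : PySem.Set (Int × Int)) (hend : ¬ c = end_) (hdep : ¬ (p.length : Int) > md) :
    kmDfs end_ md 0 c p v = [] := by
  rw [kmDfs.eq_def, if_neg hend, if_neg hdep]

lemma kmDfs_succ (end_ : Int × Int) (md : Int) (n : Nat) (c : Int × Int) (p : List (Int × Int))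
    (v : PySem.Set (Int × Int)) (hend : ¬ c = end_) (hdep : ¬ (p.length : Int) > md) :
    kmDfs end_ md (n + 1) c p v =
      kmKnightMoves.foldl (fun acc move =>
        let next_pos : Int × Int := (c.1 + move.1, c.2 + move.2)
        if kmIsValidMove next_pos ∧ ¬ PySem.Set.contains v next_pos then
          acc ++ kmDfs end_ md n next_pos (p ++ [next_pos]) (PySem.Set.add v next_pos)
        else acc) [] := by
  rw [kmDfs.eq_def, if_neg hend, if_neg hdep]

-- A's foldl over the moves collects exactly the dfs results of the frames B builds for them
lemma kmFold_eq (end_ : Int × Int) (max_depth : Int) (c : Int × Int) (p : List (Int × Int))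
    (v : PySem.Set (Int × Int)) (f : Nat) :
    ∀ (moves : List (Int × Int)) (acc : List (List (Int × Int))),
      moves.foldl (fun acc move =>
        let next_pos : Int × Int := (c.1 + move.1, c.2 + move.2)
        if kmIsValidMove next_pos ∧ ¬ PySem.Set.contains v next_pos then
          acc ++ kmDfs end_ max_depth f next_pos (p ++ [next_pos]) (PySem.Set.add v next_pos)
        else acc) acc
      = acc ++ ((kmChildren moves c p v f).map (kmDfsFrame end_ max_depth)).flatten := by
  intro moves
  induction moves with
  | nil => intro acc; simp [kmChildren]
  | cons m ms ih =>
    intro acc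
    simp only [List.foldl_cons, kmChildren, List.foldr_cons]
    split
    · rw [ih, List.map_cons, List.flatten_cons, List.append_assoc]
      rfl
    · rw [ih]
      rfl

-- B's stack loop returns the accumulated paths followed by A's dfs output of each frame in order
lemma kmLoop_eq (end_ : Int × Int) (max_depth : Int) :
    ∀ (frames : List KmFrame) (paths : List (List (Int × Int))),
      kmLoop end_ max_depth frames paths
        = paths ++ (frames.map (kmDfsFrame end_ max_depth)).flatten := by
  intro frames paths
  induction frames, paths using kmLoop.induct end_ max_depth with
  | case1 paths => simp [kmLoop]
  | case2 p v f rest paths ih =>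
    rw [kmLoop, if_pos rfl, ih]
    show _ = paths ++ (kmDfs end_ max_depth f end_ p v ++ _)
    rw [kmDfs_end]
    simp
  | case3 c p v f rest paths hend hdep ih =>
    rw [kmLoop, if_neg hend, if_pos hdep, ih]
    show _ = paths ++ (kmDfs end_ max_depth f c p v ++ _)
    rw [kmDfs_deep end_ max_depth f c p v hend hdep]
    rfl
  | case4 c p v rest paths hend hdep ih =>
    rw [kmLoop, if_neg hend, if_neg hdep, if_pos rfl, ih]
    show _ = paths ++ (kmDfs end_ max_depth 0 c p v ++ _)
    rw [kmDfs_zero end_ max_depth c p v hend hdep]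
    rfl
  | case5 c p v f rest paths hend hdep hf ih =>
    rw [kmLoop, if_neg hend, if_neg hdep, if_neg hf, ih]
    obtain ⟨n, rfl⟩ : ∃ n, f = n + 1 := ⟨f - 1, by omega⟩
    show _ = paths ++ (kmDfs end_ max_depth (n + 1) c p v ++ _)
    rw [kmDfs_succ end_ max_depth n c p v hend hdep,
      kmFold_eq end_ max_depth c p v n kmKnightMoves []]
    simp

-- ===== VERDICT (by name: the statement is the Claim_ definition above) =====
theorem find_knight_paths_spec : Claim_equal_find_knight_paths := by
  intro start end_ max_depth _
  unfold Spec_find_knight_paths find_knight_paths find_knight_paths_alt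
  rw [kmLoop_eq]
  simp [kmDfsFrame]
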